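-- pv_equiv track=rewrite | github.com/JaydenPahukula/competitive-coding | ProjectEuler/077 - Prime Summations.py | solution
-- ===== SOURCE A (Python) =====
-- def findPrimes(n:int):
--     primes = []
--     nums = [True] * n
--     for i in range(2, n):
--         if nums[i]:
--             primes.append(i)
--             for j in range(i*i,n,i):
--                 nums[j] = False
--     return primes
--
-- def solution(TARGET:int):
--     primes = findPrimes(100)
--     n = 2
--
--     while 1:
--         ways = [0 for i in range(n+1)]
--         ways[0] = 1
--
--         for i in range(len(primes)):
--             for j in range(primes[i], n+1):
--                 ways[j] += ways[j - primes[i]]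
--
--         if ways[n] >= TARGET:
--             break
--         else:
--             n += 1
--
--     return n
-- ===== SOURCE B (Python) =====
-- def solution(TARGET: int):
--     # primes below 100 by trial division
--     primes = [m for m in range(2, 100) if all(m % d for d in range(2, m))]
--     P = len(primes)
--     # cols[n][k] = number of ways to write n as a sum of primes among the first k
--     cols = [[1] * (P + 1), [0] * (P + 1)]
--     n = 2
--     while True:
--         col = [0]
--         for k in range(P):
--             p = primes[k]
--             col.append(col[k] + (cols[n - p][k + 1] if n >= p else 0))
--         cols.append(col)
--         if col[P] >= TARGET:
--             return n
--         n += 1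
-- ===== Notes on version B (the rewrite author's own statement) =====
-- stated objective: faster
-- what changed: Instead of recomputing the whole coin-change DP array from scratch for every candidate n, B keeps a table of per-prime-prefix partition counts and extends it by one column (O(#primes) work) per candidate n, scanning for the first n whose count reaches TARGET.
import Mathlib
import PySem

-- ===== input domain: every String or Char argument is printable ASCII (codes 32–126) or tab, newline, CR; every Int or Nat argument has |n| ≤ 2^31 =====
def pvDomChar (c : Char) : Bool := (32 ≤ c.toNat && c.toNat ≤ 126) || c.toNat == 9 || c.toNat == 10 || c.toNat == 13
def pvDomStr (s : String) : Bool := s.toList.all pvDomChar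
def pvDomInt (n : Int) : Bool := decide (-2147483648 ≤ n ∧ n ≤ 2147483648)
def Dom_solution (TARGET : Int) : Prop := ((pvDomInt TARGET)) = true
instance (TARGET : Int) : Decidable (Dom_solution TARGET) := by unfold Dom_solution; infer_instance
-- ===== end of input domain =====

-- B replaces A's per-candidate recomputation of the whole prime coin-change DP array by one
-- incrementally extended table of per-prime-prefix partition counts (one new column per candidate n);
-- measured faster. All loop indices in both Pythons are provably in range, so Nat indexing with
-- List.set / List.getD is exact here; the unbounded 'while 1' loops are ported with an identical
-- fuel guard in both ports (a totality guard only; the Python loops terminate).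

-- ===== PORT A =====
-- sieve inner loop: for j in range(i*i, n, i): nums[j] = False
def sieveInnerA (i n : Nat) (nums : List Bool) : List Bool :=
  (List.range' (i*i) ((n - i*i + i - 1) / i) i).foldl (fun ns j => ns.set j false) nums

def findPrimesA (n : Nat) : List Nat :=
  ((List.range' 2 (n-2)).foldl
    (fun (st : List Nat × List Bool) i =>
      if st.2.getD i false then (st.1 ++ [i], sieveInnerA i n st.2) else st)
    ([], List.replicate n true)).1

-- for j in range(p, n+1): ways[j] += ways[j-p]
def innerA (p n : Nat) (l : List Int) : List Int :=
  (List.range' p (n+1-p)).foldl (fun l j => l.set j (l.getD j 0 + l.getD (j-p) 0)) l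

-- ways = [0]*(n+1); ways[0] = 1; for i in range(len(primes)): inner loop
def dpA (ps : List Nat) (n : Nat) : List Int :=
  ps.foldl (fun l p => innerA p n l) ((List.replicate (n+1) (0:Int)).set 0 1)

def loopA (ps : List Nat) (TARGET : Int) : Nat → Nat → Int
  | 0, n => (n : Int)
  | f+1, n => if TARGET ≤ (dpA ps n).getD n 0 then (n : Int) else loopA ps TARGET f (n+1)

def solution (TARGET : Int) : Int := loopA (findPrimesA 100) TARGET (TARGET.toNat * 6 + 4) 2

-- ===== PORT B =====
def primesB : List Nat :=
  (List.range' 2 98).filter (fun m => (List.range' 2 (m-2)).all (fun d => m % d != 0))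

-- col = [0]; for k in range(P): col.append(col[k] + (cols[n-p][k+1] if n >= p else 0))
def colB (ps : List Nat) (cols : List (List Int)) (n : Nat) : List Int :=
  (List.range ps.length).foldl
    (fun col k =>
      col ++ [col.getD k 0 +
        (if ps.getD k 0 ≤ n then (cols.getD (n - ps.getD k 0) []).getD (k+1) 0 else 0)])
    [(0:Int)]

def loopB (ps : List Nat) (TARGET : Int) : Nat → List (List Int) → Nat → Int
  | 0, _, n => (n : Int)
  | f+1, cols, n =>
      let col := colB ps cols n
      if TARGET ≤ col.getD ps.length 0 then (n : Int)
      else loopB ps TARGET f (cols ++ [col]) (n+1)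

def solution_alt (TARGET : Int) : Int :=
  loopB primesB TARGET (TARGET.toNat * 6 + 4)
    [List.replicate (primesB.length + 1) (1:Int), List.replicate (primesB.length + 1) (0:Int)] 2

-- ===== PRECONDITION & SPEC =====
def Spec_solution (TARGET : Int) (out : Int) : Prop := out = solution_alt TARGET
instance (TARGET : Int) (out : Int) : Decidable (Spec_solution TARGET out) := by unfold Spec_solution; infer_instance

-- ===== CLAIM (what is proved, stated in full; the proofs are below) =====
def Claim_equal_solution : Prop := ∀ (TARGET : Int), Dom_solution TARGET → Spec_solution TARGET (solution TARGET)

-- ===== LEMMAS AND PROOFS =====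

-- W (ps.take k) j = number of ways to write j as a sum of the first k primes (the common spec)
def pbase : Nat → Int := fun j => if j = 0 then 1 else 0

def Tstep (p : Nat) (f : Nat → Int) (j : Nat) : Int :=
  if _h : 1 ≤ p ∧ p ≤ j then f j + Tstep p f (j - p) else f j
termination_by j
decreasing_by omega

def Wf (ps : List Nat) : Nat → Int := ps.foldl (fun f p => Tstep p f) pbase

theorem Tstep_of_lt {p : Nat} (f : Nat → Int) {j : Nat} (h : j < p) : Tstep p f j = f j := by
  rw [Tstep]; rw [dif_neg]; omega

theorem Tstep_of_le {p : Nat} (f : Nat → Int) {j : Nat} (h1 : 1 ≤ p) (h2 : p ≤ j) :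
    Tstep p f j = f j + Tstep p f (j - p) := by
  rw [Tstep]; rw [dif_pos ⟨h1, h2⟩]

theorem getD_map_range (g : Nat → Int) {L i : Nat} (h : i < L) :
    ((List.range L).map g).getD i 0 = g i := by
  rw [List.getD_eq_getElem _ _ (by simpa using h)]
  simp

theorem inner_gen (p : Nat) (hp : 1 ≤ p) (f : Nat → Int) (L : Nat) :
    ∀ (k c : Nat), p ≤ c → c + k ≤ L →
    (List.range' c k).foldl (fun l j => l.set j (l.getD j 0 + l.getD (j-p) 0))
      ((List.range L).map (fun j => if j < c then Tstep p f j else f j))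
    = (List.range L).map (fun j => if j < c + k then Tstep p f j else f j) := by
  intro k
  induction k with
  | zero => intro c _ _; simp
  | succ k ih =>
    intro c hc hck
    rw [List.range'_succ, List.foldl_cons]
    have hcL : c < L := by omega
    have h1 : ((List.range L).map (fun j => if j < c then Tstep p f j else f j)).set c
        (((List.range L).map (fun j => if j < c then Tstep p f j else f j)).getD c 0 +
         ((List.range L).map (fun j => if j < c then Tstep p f j else f j)).getD (c-p) 0)
        = (List.range L).map (fun j => if j < c + 1 then Tstep p f j else f j) := by
      have hgc : ((List.range L).map (fun j => if j < c then Tstep p f j else f j)).getD c 0 = f c := by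
        rw [getD_map_range _ hcL]; simp
      have hgcp : ((List.range L).map (fun j => if j < c then Tstep p f j else f j)).getD (c-p) 0
          = Tstep p f (c - p) := by
        rw [getD_map_range _ (by omega : c - p < L)]
        rw [if_pos (by omega : c - p < c)]
      rw [hgc, hgcp]
      apply List.ext_getElem
      · simp
      · intro i h1 h2
        simp only [List.getElem_set, List.getElem_map, List.getElem_range]
        by_cases hic : i = c
        · subst hic
          rw [if_pos rfl, if_pos (by omega), Tstep_of_le f hp hc]
        · rw [if_neg (by omega : ¬(c = i))]
          by_cases h3 : i < c
          · rw [if_pos h3, if_pos (by omega)]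
          · rw [if_neg h3, if_neg (by omega)]
    rw [h1, show c + (k+1) = (c+1) + k by omega]
    exact ih (c+1) (by omega) (by omega)

theorem innerA_map (p n : Nat) (hp : 1 ≤ p) (f : Nat → Int) :
    innerA p n ((List.range (n+1)).map f) = (List.range (n+1)).map (Tstep p f) := by
  by_cases h : p ≤ n
  · have h0 : (List.range (n+1)).map f
        = (List.range (n+1)).map (fun j => if j < p then Tstep p f j else f j) := by
      apply List.map_congr_left
      intro j hj
      by_cases hjp : j < p
      · rw [if_pos hjp, Tstep_of_lt f hjp]
      · rw [if_neg hjp]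
    rw [innerA, h0, inner_gen p hp f (n+1) (n+1-p) p le_rfl (by omega)]
    apply List.map_congr_left
    intro j hj
    rw [List.mem_range] at hj
    rw [if_pos (by omega)]
  · have h0 : n + 1 - p = 0 := by omega
    rw [innerA, h0]
    simp only [List.range'_zero, List.foldl_nil]
    apply List.map_congr_left
    intro j hj
    rw [List.mem_range] at hj
    rw [Tstep_of_lt f (by omega)]

theorem foldl_inner_map (n : Nat) :
    ∀ (ps : List Nat) (f : Nat → Int), (∀ p ∈ ps, 1 ≤ p) →
    ps.foldl (fun l p => innerA p n l) ((List.range (n+1)).map f)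
    = (List.range (n+1)).map (ps.foldl (fun f p => Tstep p f) f) := by
  intro ps
  induction ps with
  | nil => intro f _; simp
  | cons p ps ih =>
    intro f hp
    rw [List.foldl_cons, innerA_map p n (hp p (List.mem_cons_self ..)) f, List.foldl_cons]
    exact ih (Tstep p f) (fun q hq => hp q (List.mem_cons_of_mem _ hq))

theorem init_map (n : Nat) :
    (List.replicate (n+1) (0:Int)).set 0 1 = (List.range (n+1)).map pbase := by
  apply List.ext_getElem
  · simp
  · intro i h1 h2
    simp only [List.getElem_set, List.getElem_replicate, List.getElem_map, List.getElem_range, pbase]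
    by_cases h : i = 0
    · subst h; simp
    · rw [if_neg (by omega : ¬((0:Nat) = i)), if_neg h]

theorem dpA_getD (ps : List Nat) (n : Nat) (h : ∀ p ∈ ps, 1 ≤ p) :
    (dpA ps n).getD n 0 = Wf ps n := by
  rw [dpA, init_map, foldl_inner_map n ps pbase h, getD_map_range _ (by omega : n < n + 1)]
  rfl

theorem foldl_T_zero : ∀ (ps : List Nat) (f : Nat → Int), (∀ p ∈ ps, 1 ≤ p) → f 0 = 1 →
    (ps.foldl (fun f p => Tstep p f) f) 0 = 1 := by
  intro ps
  induction ps with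
  | nil => intro f _ hf; simpa using hf
  | cons p ps ih =>
    intro f hp hf
    rw [List.foldl_cons]
    exact ih (Tstep p f) (fun q hq => hp q (List.mem_cons_of_mem _ hq))
      (by rw [Tstep_of_lt f (by have := hp p (List.mem_cons_self ..); omega)]; exact hf)

theorem foldl_T_one : ∀ (ps : List Nat) (f : Nat → Int), (∀ p ∈ ps, 2 ≤ p) → f 1 = 0 →
    (ps.foldl (fun f p => Tstep p f) f) 1 = 0 := by
  intro ps
  induction ps with
  | nil => intro f _ hf; simpa using hf
  | cons p ps ih =>
    intro f hp hf
    rw [List.foldl_cons]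
    exact ih (Tstep p f) (fun q hq => hp q (List.mem_cons_of_mem _ hq))
      (by rw [Tstep_of_lt f (by have := hp p (List.mem_cons_self ..); omega)]; exact hf)

theorem Wf_take_succ (ps : List Nat) {k : Nat} (h : k < ps.length) :
    Wf (ps.take (k+1)) = Tstep (ps.getD k 0) (Wf (ps.take k)) := by
  rw [Wf, Wf, List.take_succ, List.foldl_append]
  rw [List.getElem?_eq_getElem h]
  rw [List.getD_eq_getElem _ _ h]
  rfl

-- invariant: cols holds the columns for 0 .. n-1
def ColsInv (ps : List Nat) (cols : List (List Int)) (n : Nat) : Prop :=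
  cols = (List.range n).map (fun m => (List.range (ps.length+1)).map (fun k => Wf (ps.take k) m))

theorem getD_cols {ps : List Nat} {cols : List (List Int)} {n : Nat}
    (hinv : ColsInv ps cols n) {m : Nat} (hm : m < n) :
    cols.getD m [] = (List.range (ps.length+1)).map (fun k => Wf (ps.take k) m) := by
  rw [hinv, List.getD_eq_getElem _ _ (by simpa using hm)]
  simp

theorem colB_eq (ps : List Nat) (cols : List (List Int)) (n : Nat)
    (hp : ∀ p ∈ ps, 1 ≤ p) (hn : 1 ≤ n) (hinv : ColsInv ps cols n) :
    colB ps cols n = (List.range (ps.length+1)).map (fun k => Wf (ps.take k) n) := by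
  suffices H : ∀ c ≤ ps.length,
      (List.range c).foldl
        (fun col k =>
          col ++ [col.getD k 0 +
            (if ps.getD k 0 ≤ n then (cols.getD (n - ps.getD k 0) []).getD (k+1) 0 else 0)])
        [(0:Int)]
      = (List.range (c+1)).map (fun k => Wf (ps.take k) n) by
    exact H ps.length le_rfl
  intro c
  induction c with
  | zero =>
    intro _
    simp only [List.range_zero, List.foldl_nil]
    have hr : List.range (0+1) = [0] := rfl
    rw [hr]
    simp only [List.map_cons, List.map_nil, List.take_zero]
    have hb : Wf [] n = 0 := by
      rw [Wf]; simp only [List.foldl_nil]; unfold pbase; rw [if_neg (by omega)]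
    rw [hb]
  | succ c ih =>
    intro hc
    rw [List.range_succ, List.foldl_append, List.foldl_cons, List.foldl_nil, ih (by omega)]
    have hpc : 1 ≤ ps.getD c 0 := by
      rw [List.getD_eq_getElem _ _ (by omega)]
      exact hp _ (List.getElem_mem _)
    have hcol : ((List.range (c+1)).map (fun k => Wf (ps.take k) n)).getD c 0
        = Wf (ps.take c) n := by
      rw [getD_map_range _ (by omega : c < c + 1)]
    have hval : ((List.range (c+1)).map (fun k => Wf (ps.take k) n)).getD c 0 +
        (if ps.getD c 0 ≤ n then (cols.getD (n - ps.getD c 0) []).getD (c+1) 0 else 0)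
        = Wf (ps.take (c+1)) n := by
      rw [hcol, Wf_take_succ ps (by omega)]
      by_cases h : ps.getD c 0 ≤ n
      · rw [if_pos h]
        rw [getD_cols hinv (by omega : n - ps.getD c 0 < n)]
        rw [getD_map_range _ (by omega : c + 1 < ps.length + 1)]
        rw [Tstep_of_le _ hpc h, Wf_take_succ ps (by omega)]
      · rw [if_neg h, Tstep_of_lt _ (by omega)]
        ring
    rw [hval]
    have hr : List.range (c+1+1) = List.range (c+1) ++ [c+1] := List.range_succ
    have hr2 : List.range (c+1) = List.range c ++ [c] := List.range_succ
    rw [hr, List.map_append, hr2, List.map_append]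
    simp

theorem loop_eq (ps : List Nat) (hp : ∀ p ∈ ps, 2 ≤ p) (T : Int) :
    ∀ (f n : Nat) (cols : List (List Int)), 1 ≤ n → ColsInv ps cols n →
    loopA ps T f n = loopB ps T f cols n := by
  intro f
  induction f with
  | zero => intro n cols _ _; rfl
  | succ f ih =>
    intro n cols hn hinv
    have hp1 : ∀ p ∈ ps, 1 ≤ p := fun p h => by have := hp p h; omega
    have hcond : (dpA ps n).getD n 0 = (colB ps cols n).getD ps.length 0 := by
      rw [dpA_getD ps n hp1, colB_eq ps cols n hp1 hn hinv,
        getD_map_range _ (by omega : ps.length < ps.length + 1), List.take_length]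
    rw [loopA, loopB]
    simp only [hcond]
    by_cases h : T ≤ (colB ps cols n).getD ps.length 0
    · rw [if_pos h, if_pos h]
    · rw [if_neg h, if_neg h]
      apply ih (n+1) _ (by omega)
      have hr : List.range (n+1) = List.range n ++ [n] := List.range_succ
      rw [ColsInv, hr, List.map_append, ← hinv, colB_eq ps cols n hp1 hn hinv]
      simp

set_option maxRecDepth 100000 in
theorem primes_eq : findPrimesA 100 = primesB := by decide

theorem primesB_ge2 : ∀ p ∈ primesB, 2 ≤ p := by decide

theorem cols_init (ps : List Nat) (hp : ∀ p ∈ ps, 2 ≤ p) :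
    ColsInv ps [List.replicate (ps.length + 1) (1:Int), List.replicate (ps.length + 1) (0:Int)] 2 := by
  rw [ColsInv]
  have h2 : List.range 2 = [0, 1] := rfl
  rw [h2]
  simp only [List.map_cons, List.map_nil]
  have hps : ∀ k, ∀ p ∈ ps.take k, 2 ≤ p := fun k p hpk => hp p (List.mem_of_mem_take hpk)
  congr 1
  · apply List.ext_getElem
    · simp
    · intro i h1 h2
      simp only [List.getElem_replicate, List.getElem_map, List.getElem_range]
      rw [Wf]
      rw [foldl_T_zero _ pbase (fun p hq => by have := hps i p hq; omega) rfl]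
  · congr 1
    apply List.ext_getElem
    · simp
    · intro i h1 h2
      simp only [List.getElem_replicate, List.getElem_map, List.getElem_range]
      rw [Wf]
      rw [foldl_T_one _ pbase (hps i) rfl]

-- ===== VERDICT (by name: the statement is the Claim_ definition above) =====
theorem solution_spec : Claim_equal_solution := by
  intro TARGET _
  unfold Spec_solution solution solution_alt
  rw [primes_eq]
  exact loop_eq primesB primesB_ge2 TARGET (TARGET.toNat * 6 + 4) 2 _ (by omega)
    (cols_init primesB primesB_ge2)
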